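-- pv_equiv track=rewrite | github.com/KYUSEONGHAN/Development | 하루에 한개씩 문제 풀기/Python/Programmers/모든 문제/Level 0/무작위로 k개의 수 뽑기.py | solution
-- ===== SOURCE A (Python) =====
-- def solution(arr, k):
--     unique_nums = set()
--     result = []
--
--     for num in arr:
--         if num not in unique_nums:
--             unique_nums.add(num)
--             result.append(num)
--
--         if len(result) == k:
--             break
--
--     while len(result) < k:
--         result.append(-1)
--
--     return result
-- ===== SOURCE B (Python) =====
-- def solution(arr, k):
--     # selection by repeated filtering: take the current head, then drop every
--     # occurrence of it from the remainder; no membership set is ever kept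
--     out = []
--     rest = arr
--     while rest and len(out) != k:
--         head = rest[0]
--         out.append(head)
--         rest = [x for x in rest[1:] if x != head]
--     return out + [-1] * (k - len(out))
-- ===== Notes on version B (the rewrite author's own statement) =====
-- stated objective: alternative
-- what changed: A's single pass with a membership set, early break and padding while-loop is replaced by selection-by-repeated-filtering: repeatedly take the head of the remaining list, then filter every occurrence of it out of the remainder, so no membership structure is kept at all.
-- intended difference: For k = 0 with a nonempty array A's break condition (checked only after an append) never fires so it returns the full deduplicated list instead of the requested 0 values, while B returns [], the intended answer. — e.g. on solution([5], 0): A returns [5], B returns []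
import Mathlib
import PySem

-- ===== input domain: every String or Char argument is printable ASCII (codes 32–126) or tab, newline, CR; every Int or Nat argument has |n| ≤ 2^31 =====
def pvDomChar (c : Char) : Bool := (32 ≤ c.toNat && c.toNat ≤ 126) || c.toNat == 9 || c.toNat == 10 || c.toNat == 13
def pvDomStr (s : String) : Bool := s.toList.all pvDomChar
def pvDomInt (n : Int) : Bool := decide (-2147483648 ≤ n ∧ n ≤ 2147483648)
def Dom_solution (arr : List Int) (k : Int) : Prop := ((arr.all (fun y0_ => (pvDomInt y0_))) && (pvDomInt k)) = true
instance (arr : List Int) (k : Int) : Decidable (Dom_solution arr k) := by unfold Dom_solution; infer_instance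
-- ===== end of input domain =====

-- B replaces A's single pass (membership set, early break, padding while-loop) by
-- selection-by-repeated-filtering; return values only, neither mutates its arguments.

-- ===== PORT A =====
-- the for-loop of A: state = (unique_nums, result); break when len(result) == k
def solutionLoop (k : Int) : List Int → PySem.Set Int → List Int → List Int
  | [], _, res => res
  | x :: xs, seen, res =>
    let seen' := if PySem.Set.contains seen x then seen else PySem.Set.add seen x
    let res' := if PySem.Set.contains seen x then res else res ++ [x]
    if (res'.length : Int) = k then res' else solutionLoop k xs seen' res'

def solution (arr : List Int) (k : Int) : List Int :=
  let res := solutionLoop k arr PySem.Set.empty []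
  -- the trailing while-loop: append -1 until len(result) == k
  res ++ List.replicate (k - res.length).toNat (-1)

-- ===== PORT B =====
-- B's while-loop: state = (rest, out); stop when rest is empty or len(out) == k; each step
-- takes the head and filters all its occurrences out of the remainder. Fuel = initial list
-- length makes the loop structural: each iteration strictly shortens rest, so with
-- fuel = arr.length the fuel-exhausted case is unreachable.
def altLoop (k : Int) : Nat → List Int → List Int → List Int
  | _, [], out => out
  | 0, _ :: _, out => out
  | fuel + 1, x :: xs, out =>
    if (out.length : Int) = k then out
    else altLoop k fuel (xs.filter (fun y => decide (y ≠ x))) (out ++ [x])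

def solution_alt (arr : List Int) (k : Int) : List Int :=
  let out := altLoop k arr.length arr []
  out ++ List.replicate (k - out.length).toNat (-1)   -- out + [-1] * (k - len(out))

-- ===== PRECONDITION & SPEC =====
-- For k = 0 with nonempty arr, A's break (checked only after an append) never fires and it
-- returns the full deduplicated list; B returns [], the requested 0 values.
def D_solution (arr : List Int) (k : Int) : Prop := k = 0 ∧ arr ≠ []
instance (arr : List Int) (k : Int) : Decidable (D_solution arr k) := by unfold D_solution; infer_instance
def Spec_solution (arr : List Int) (k : Int) (out : List Int) : Prop := ¬ D_solution arr k → out = solution_alt arr k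
instance (arr : List Int) (k : Int) (out : List Int) : Decidable (Spec_solution arr k out) := by unfold Spec_solution; infer_instance
def pvDiffWitness_solution : List Int × Int := ([5], 0)
def pvDiffWitnessOut_solution : (List Int) × (List Int) := ([5], [])

-- ===== CLAIM =====
def Claim_unchanged_solution : Prop := ∀ (arr : List Int) (k : Int), Dom_solution arr k → Spec_solution arr k (solution arr k)
def Claim_changed_solution : Prop := Dom_solution (pvDiffWitness_solution.1) (pvDiffWitness_solution.2) ∧ D_solution (pvDiffWitness_solution.1) (pvDiffWitness_solution.2) ∧ solution (pvDiffWitness_solution.1) (pvDiffWitness_solution.2) = pvDiffWitnessOut_solution.1 ∧ solution_alt (pvDiffWitness_solution.1) (pvDiffWitness_solution.2) = pvDiffWitnessOut_solution.2 ∧ pvDiffWitnessOut_solution.1 ≠ pvDiffWitnessOut_solution.2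
def Claim_exact_solution : Prop := ∀ (arr : List Int) (k : Int), Dom_solution arr k → D_solution arr k → solution arr k ≠ solution_alt arr k

-- ===== LEMMAS AND PROOFS =====

-- head-removal dedup with the same fuel discipline: what B's loop produces if it never stops
def ddr : Nat → List Int → List Int
  | _, [] => []
  | 0, _ :: _ => []
  | fuel + 1, x :: xs => x :: ddr fuel (xs.filter (fun y => decide (y ≠ x)))

-- foldl Set.add only ever appends
lemma foldl_add_prefix (xs : List Int) (s : PySem.Set Int) :
    ∃ t, xs.foldl PySem.Set.add s = s ++ t := by
  induction xs generalizing s with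
  | nil => exact ⟨[], by simp⟩
  | cons x xs ih =>
    obtain ⟨t, ht⟩ := ih (PySem.Set.add s x)
    by_cases h : x ∈ s
    · exact ⟨t, by rw [List.foldl_cons, ht]; simp [PySem.Set.add, h]⟩
    · exact ⟨x :: t, by rw [List.foldl_cons, ht]; simp [PySem.Set.add, h]⟩

-- A's set-based dedup equals head-removal dedup (on the not-yet-seen elements)
lemma foldl_add_eq_ddr (xs : List Int) :
    ∀ (fuel : Nat) (seen : List Int), xs.length ≤ fuel →
      xs.foldl PySem.Set.add seen =
        seen ++ ddr fuel (xs.filter (fun y => !(seen.contains y))) := by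
  induction xs with
  | nil => intro fuel seen _; cases fuel <;> simp [ddr]
  | cons x xs ih =>
    intro fuel seen hf
    cases fuel with
    | zero => simp at hf
    | succ f =>
      by_cases h : x ∈ seen
      · rw [List.foldl_cons, PySem.Set.add_of_mem h, ih (f + 1) seen (by simp at hf; omega),
          List.filter_cons]
        simp [h]
      · rw [List.foldl_cons, PySem.Set.add_of_not_mem h, ih f (seen ++ [x]) (by simp at hf; omega),
          List.filter_cons]
        have hfilt : List.filter (fun y => !((seen ++ [x]).contains y)) xs =
            List.filter (fun y => decide (y ≠ x)) (List.filter (fun y => !(seen.contains y)) xs) := by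
          rw [List.filter_filter]
          refine List.filter_congr (fun y _ => ?_)
          by_cases hy : y = x <;> by_cases hs : y ∈ seen <;> simp [hy, hs]
        rw [hfilt]
        simp [h, ddr, List.append_assoc]

-- in A's loop the set and the result list are always the same list;
-- with len(seen) < k the loop computes the k-truncated dedup continuation
lemma loop_take (k : Int) (xs : List Int) (seen : List Int)
    (hk : (seen.length : Int) < k) :
    solutionLoop k xs seen seen = List.take k.toNat (xs.foldl PySem.Set.add seen) := by
  induction xs generalizing seen with
  | nil =>
    simp only [solutionLoop, List.foldl_nil]
    exact (List.take_of_length_le (by omega)).symm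
  | cons x xs ih =>
    simp only [solutionLoop, List.foldl_cons, PySem.Set.add]
    by_cases h : PySem.Set.contains seen x
    · simp only [h, if_true]
      rw [if_neg (by omega)]
      exact ih seen hk
    · simp only [h, Bool.false_eq_true, if_false]
      by_cases hlen : ((seen ++ [x]).length : Int) = k
      · rw [if_pos hlen]
        obtain ⟨t, ht⟩ := foldl_add_prefix xs (seen ++ [x])
        rw [ht, List.take_append_of_le_length (by simp at hlen ⊢; omega),
          List.take_of_length_le (by simp at hlen ⊢; omega)]
      · rw [if_neg hlen]
        exact ih (seen ++ [x]) (by simp at hlen ⊢; omega)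

-- with k = 0 the break never fires and A's loop computes the full dedup
lemma loop_zero (xs : List Int) (seen : List Int) :
    solutionLoop 0 xs seen seen = xs.foldl PySem.Set.add seen := by
  induction xs generalizing seen with
  | nil => simp [solutionLoop]
  | cons x xs ih =>
    simp only [solutionLoop, List.foldl_cons, PySem.Set.add]
    by_cases h : PySem.Set.contains seen x
    · have hne : seen ≠ [] := by
        intro hnil; rw [hnil] at h; simp [PySem.Set.contains] at h
      simp only [h, if_true]
      have hlen0 : ¬ ((seen.length : Int) = 0) := by
        intro habs
        exact hne (List.eq_nil_of_length_eq_zero (by omega))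
      rw [if_neg hlen0]
      exact ih seen
    · simp only [h, Bool.false_eq_true, if_false]
      rw [if_neg (by intro habs; simp only [List.length_append, List.length_cons,
        List.length_nil] at habs; omega)]
      exact ih (seen ++ [x])

-- with k < 0 the break never fires either
lemma loop_neg (k : Int) (hk : k < 0) (xs : List Int) (seen : List Int) :
    solutionLoop k xs seen seen = xs.foldl PySem.Set.add seen := by
  induction xs generalizing seen with
  | nil => simp [solutionLoop]
  | cons x xs ih =>
    simp only [solutionLoop, List.foldl_cons, PySem.Set.add]
    by_cases h : PySem.Set.contains seen x
    · simp only [h, if_true]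
      rw [if_neg (by intro habs; omega)]
      exact ih seen
    · simp only [h, Bool.false_eq_true, if_false]
      rw [if_neg (by intro habs; simp only [List.length_append, List.length_cons,
        List.length_nil] at habs; omega)]
      exact ih (seen ++ [x])

-- with k < 0 B's loop never stops before the list is exhausted: full head-removal dedup
lemma altLoop_neg (k : Int) (hk : k < 0) :
    ∀ (fuel : Nat) (rest out : List Int), rest.length ≤ fuel →
      altLoop k fuel rest out = out ++ ddr fuel rest := by
  intro fuel
  induction fuel with
  | zero =>
    intro rest out h
    have : rest = [] := List.eq_nil_of_length_eq_zero (Nat.le_zero.mp h)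
    subst this; simp [altLoop, ddr]
  | succ f ih =>
    intro rest out h
    cases rest with
    | nil => simp [altLoop, ddr]
    | cons x xs =>
      rw [altLoop, if_neg (by intro habs; omega),
        ih (xs.filter (fun y => decide (y ≠ x))) (out ++ [x])
          (le_trans (List.length_filter_le _ _) (by simpa using h))]
      simp [ddr, List.append_assoc]

-- with len(out) ≤ k B's loop takes the next (k - len(out)) head-removal dedup elements
lemma altLoop_take (k : Int) :
    ∀ (fuel : Nat) (rest out : List Int), rest.length ≤ fuel → (out.length : Int) ≤ k →
      altLoop k fuel rest out = out ++ (ddr fuel rest).take (k - out.length).toNat := by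
  intro fuel
  induction fuel with
  | zero =>
    intro rest out h _
    have : rest = [] := List.eq_nil_of_length_eq_zero (Nat.le_zero.mp h)
    subst this; simp [altLoop, ddr]
  | succ f ih =>
    intro rest out h hout
    cases rest with
    | nil => simp [altLoop, ddr]
    | cons x xs =>
      by_cases hk : (out.length : Int) = k
      · rw [altLoop, if_pos hk]
        have : (k - (out.length : Int)).toNat = 0 := by omega
        simp [this]
      · rw [altLoop, if_neg hk,
          ih (xs.filter (fun y => decide (y ≠ x))) (out ++ [x])
            (le_trans (List.length_filter_le _ _) (by simpa using h))
            (by simp; omega)]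
        have htn : (k - (out.length : Int)).toNat =
            (k - ((out ++ [x]).length : Int)).toNat + 1 := by simp; omega
        rw [ddr, htn, List.take_succ_cons]
        simp [List.append_assoc]

-- ===== VERDICT =====
theorem solution_spec : Claim_unchanged_solution := by
  intro arr k _ hnd
  unfold D_solution at hnd
  simp only [solution, solution_alt]
  have hd : arr.foldl PySem.Set.add [] = ddr arr.length arr := by
    have := foldl_add_eq_ddr arr arr.length [] le_rfl
    simpa using this
  rcases lt_trichotomy k 0 with hk | hk | hk
  · have hA : solutionLoop k arr PySem.Set.empty [] = ddr arr.length arr := by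
      have := loop_neg k hk arr []
      simpa [PySem.Set.empty, hd] using this
    rw [hA, altLoop_neg k hk arr.length arr [] le_rfl, List.nil_append]
  · subst hk
    have harr : arr = [] := by
      by_contra h; exact hnd ⟨rfl, h⟩
    subst harr; decide
  · have hA : solutionLoop k arr PySem.Set.empty [] =
        List.take k.toNat (ddr arr.length arr) := by
      have := loop_take k arr [] (by simpa using hk)
      simpa [PySem.Set.empty, hd] using this
    have hB : altLoop k arr.length arr [] = (ddr arr.length arr).take k.toNat := by
      have := altLoop_take k arr.length arr [] le_rfl (by simpa using le_of_lt hk)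
      simpa using this
    rw [hA, hB]

theorem solution_changed : Claim_changed_solution := by
  unfold Claim_changed_solution; decide

theorem solution_tight : Claim_exact_solution := by
  intro arr k _ hd
  obtain ⟨hk, harr⟩ := hd
  subst hk
  simp only [solution, solution_alt]
  obtain ⟨x, xs, rfl⟩ := List.exists_cons_of_ne_nil harr
  have hA : solutionLoop 0 (x :: xs) PySem.Set.empty [] = (x :: xs).foldl PySem.Set.add [] := by
    simpa [PySem.Set.empty] using loop_zero (x :: xs) []
  obtain ⟨t, ht⟩ := foldl_add_prefix xs (PySem.Set.add [] x)
  rw [hA, List.foldl_cons, ht]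
  simp [altLoop, PySem.Set.add]
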